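-- pv_equiv track=rewrite | github.com/BlackcoinDev/devassist | tests/lint/table_utils.py | calculate_expected_pipe_positions
-- ===== SOURCE A (Python) =====
-- from typing import List, Tuple
--
-- def calculate_expected_pipe_positions(col_widths: List[int]) -> List[int]:
--     """
--     Calculate expected pipe positions for MD060 compliance.
--
--     Uses the "aligned" style where pipes are positioned at consistent
--     character locations based on column content widths.
--
--     Args:
--         col_widths: Maximum character width for each column
--
--     Returns:
--         List of expected pipe positions (0-based character indices)
--     """
--     expected_pipes = []
--     current_pos = 0
--
--     # First pipe at position 0
--     expected_pipes.append(0)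
--     current_pos += 1  # After first |
--
--     # Add positions for each column
--     for col_width in col_widths:
--         # Content width + space before + space after + |
--         current_pos += 1  # space before content
--         current_pos += col_width  # content
--         current_pos += 1  # space after content
--         expected_pipes.append(current_pos)
--         current_pos += 1  # after |
--
--     return expected_pipes
-- ===== SOURCE B (Python) =====
-- def calculate_expected_pipe_positions(col_widths):
--     """Closed form: pipe i sits at 3*i + (sum of the first i column widths)."""
--     prefix = [0]
--     for w in col_widths:
--         prefix.append(prefix[-1] + w)
--     return [3 * i + s for i, s in enumerate(prefix)]
-- ===== Notes on version B (the rewrite author's own statement) =====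
-- stated objective: simpler
-- what changed: Replaces the single current_pos counter threaded through four incremental additions per column by a closed form: prefix sums of the widths plus a 3*i spacing term emitted by one enumerate comprehension.
import Mathlib
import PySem

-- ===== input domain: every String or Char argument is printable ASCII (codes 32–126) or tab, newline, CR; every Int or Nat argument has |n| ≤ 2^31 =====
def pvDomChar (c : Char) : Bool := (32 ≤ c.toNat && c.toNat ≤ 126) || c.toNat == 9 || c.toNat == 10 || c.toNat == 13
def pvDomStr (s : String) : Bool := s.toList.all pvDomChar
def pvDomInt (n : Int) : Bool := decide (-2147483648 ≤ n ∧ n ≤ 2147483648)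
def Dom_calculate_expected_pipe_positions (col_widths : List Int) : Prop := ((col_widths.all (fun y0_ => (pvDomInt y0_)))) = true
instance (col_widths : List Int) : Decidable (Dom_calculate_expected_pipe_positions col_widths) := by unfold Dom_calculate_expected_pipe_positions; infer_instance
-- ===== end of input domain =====

-- B computes each pipe position by the closed form 3*i + prefix-sum of widths instead of A's threaded counter; objective: simpler.

-- ===== PORT A =====
def calculate_expected_pipe_positions (col_widths : List Int) : List Int :=
  -- expected_pipes = [0]; current_pos = 1; loop threading (expected_pipes, current_pos)
  (col_widths.foldl
    (fun (st : List Int × Int) col_width =>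
      let pos := st.2 + 1 + col_width + 1   -- space before + content + space after
      (st.1 ++ [pos], pos + 1))             -- append, then advance past the '|'
    ([0], 1)).1

-- ===== PORT B =====
-- prefix sums of col_widths starting at s (Source B's `prefix` list, built with a running sum)
def pvPrefixSums : List Int → Int → List Int
  | [], s => [s]
  | w :: ws, s => s :: pvPrefixSums ws (s + w)

def calculate_expected_pipe_positions_alt (col_widths : List Int) : List Int :=
  (PySem.List.enumerate (pvPrefixSums col_widths 0) 0).map (fun p => 3 * p.1 + p.2)

-- ===== PRECONDITION & SPEC =====
def Spec_calculate_expected_pipe_positions (col_widths : List Int) (out : List Int) : Prop := out = calculate_expected_pipe_positions_alt col_widths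
instance (col_widths : List Int) (out : List Int) : Decidable (Spec_calculate_expected_pipe_positions col_widths out) := by unfold Spec_calculate_expected_pipe_positions; infer_instance

-- ===== CLAIM (what is proved, stated in full; the proofs are below) =====
def Claim_equal_calculate_expected_pipe_positions : Prop := ∀ (col_widths : List Int), Dom_calculate_expected_pipe_positions col_widths → Spec_calculate_expected_pipe_positions col_widths (calculate_expected_pipe_positions col_widths)

-- ===== LEMMAS AND PROOFS =====
theorem pipes_foldl_key : ∀ (ws : List Int) (acc : List Int) (n s : Int),
    (ws.foldl
      (fun (st : List Int × Int) col_width =>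
        let pos := st.2 + 1 + col_width + 1
        (st.1 ++ [pos], pos + 1))
      (acc ++ [3 * n + s], 3 * n + s + 1)).1
    = acc ++ (PySem.List.enumerate (pvPrefixSums ws s) n).map (fun p => 3 * p.1 + p.2) := by
  intro ws
  induction ws with
  | nil =>
      intro acc n s
      simp [pvPrefixSums, PySem.List.enumerate_cons, PySem.List.enumerate_nil]
  | cons w ws ih =>
      intro acc n s
      simp only [List.foldl_cons]
      have h1 : 3 * n + s + 1 + 1 + w + 1 = 3 * (n + 1) + (s + w) := by ring
      have h2 : 3 * n + s + 1 + 1 + w + 1 + 1 = 3 * (n + 1) + (s + w) + 1 := by ring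
      rw [show ((acc ++ [3 * n + s]) ++ [3 * n + s + 1 + 1 + w + 1], 3 * n + s + 1 + 1 + w + 1 + 1)
            = ((acc ++ [3 * n + s]) ++ [3 * (n + 1) + (s + w)], 3 * (n + 1) + (s + w) + 1) from by rw [h2, h1]]
      rw [ih (acc ++ [3 * n + s]) (n + 1) (s + w)]
      simp [pvPrefixSums, PySem.List.enumerate_cons]

-- ===== VERDICT (by name: the statement is the Claim_ definition above) =====
theorem calculate_expected_pipe_positions_spec : Claim_equal_calculate_expected_pipe_positions := by
  intro ws _
  show calculate_expected_pipe_positions ws = calculate_expected_pipe_positions_alt ws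
  have := pipes_foldl_key ws [] 0 0
  simpa [calculate_expected_pipe_positions, calculate_expected_pipe_positions_alt] using this
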